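-- pv_equiv track=rewrite | github.com/jackgrauer/CHONKER_SNYFTER | python/debug_fixed_chunks.py | extract_table_chunks
-- ===== SOURCE A (Python) =====
-- def break_large_table(table_lines):
--     """Break a large table into smaller chunks while preserving header structure"""
--     if not table_lines:
--         return []
--
--     chunks = []
--     header_lines = []
--     data_lines = []
--
--     # Identify header (first few lines that define structure)
--     for i, line in enumerate(table_lines[:5]):  # Check first 5 lines for header pattern
--         if '|' in line:
--             if any(char in line for char in ['---', '===', ':']):
--                 # This is a separator line
--                 header_lines = table_lines[:i+1]
--                 data_lines = table_lines[i+1:]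
--                 break
--
--     # If no clear header found, just use first line as header
--     if not header_lines and table_lines:
--         header_lines = [table_lines[0]]
--         data_lines = table_lines[1:]
--
--     # Break data lines into chunks of reasonable size
--     chunk_size = 15  # ~15 rows per chunk to stay under 8KB
--
--     for i in range(0, len(data_lines), chunk_size):
--         chunk_data = data_lines[i:i + chunk_size]
--         if chunk_data:  # Only create chunk if there's data
--             # Combine header + chunk data
--             chunk_lines = header_lines + chunk_data
--             chunks.append('\n'.join(chunk_lines))
--
--     return chunks
--
-- def extract_table_chunks(content):
--     """Extract individual tables from markdown content with smart chunking"""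
--     lines = content.split('\n')
--     table_chunks = []
--     current_chunk = []
--     in_table = False
--
--     for line in lines:
--         # Check if this looks like a table line
--         if '|' in line and len(line.split('|')) >= 3:
--             in_table = True
--             current_chunk.append(line)
--         elif in_table:
--             # Check if we should continue the table
--             if line.strip() == '' or line.strip().startswith('#'):
--                 # End of table
--                 if current_chunk:
--                     chunk_text = '\n'.join(current_chunk)
--                     # Break large chunks into smaller pieces
--                     if len(chunk_text) > 8000:  # 8KB limit for Qwen-7B
--                         sub_chunks = break_large_table(current_chunk)
--                         table_chunks.extend(sub_chunks)
--                     else: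
--                         table_chunks.append(chunk_text)
--                     current_chunk = []
--                 in_table = False
--             else:
--                 # Might be part of table (like wrapped content)
--                 current_chunk.append(line)
--
--     # Don't forget the last chunk
--     if current_chunk:
--         chunk_text = '\n'.join(current_chunk)
--         if len(chunk_text) > 8000:
--             sub_chunks = break_large_table(current_chunk)
--             table_chunks.extend(sub_chunks)
--         else:
--             table_chunks.append(chunk_text)
--
--     return table_chunks
-- ===== SOURCE B (Python) =====
-- def _is_table(line):
--     return '|' in line and len(line.split('|')) >= 3
--
-- def _is_cut(line):
--     s = line.strip()
--     return (s == '' or s.startswith('#')) and not _is_table(line)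
--
-- def _break_large_table(table_lines):
--     if not table_lines:
--         return []
--     split = 1
--     for i, line in enumerate(table_lines[:5]):
--         if '|' in line and ('---' in line or '===' in line or ':' in line):
--             split = i + 1
--             break
--     header, data = table_lines[:split], table_lines[split:]
--     return ['\n'.join(header + data[k:k + 15]) for k in range(0, len(data), 15)]
--
-- def extract_table_chunks(content):
--     # pass 1: split the lines into segments at separator lines
--     # (blank or '#'-prefixed lines that are not themselves table lines)
--     segments = [[]]
--     for line in content.split('\n'):
--         if _is_cut(line):
--             segments.append([])
--         else:
--             segments[-1].append(line)
--     # pass 2: in each segment the table block is everything from the first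
--     # table line on; emit it, splitting oversized blocks
--     out = []
--     for seg in segments:
--         k = 0
--         while k < len(seg) and not _is_table(seg[k]):
--             k += 1
--         block = seg[k:]
--         if block:
--             text = '\n'.join(block)
--             out.extend(_break_large_table(block) if len(text) > 8000 else [text])
--     return out
-- ===== Notes on version B (the rewrite author's own statement) =====
-- stated objective: alternative
-- what changed: A runs one stateful line loop with an in_table flag that interleaves detection and emission; B has no state flag at all: it first partitions the lines into segments at separator lines (blank/'#' lines that are not table lines), then in a second pass trims each segment to the suffix starting at its first table line and emits that block, with the header split of an oversized table computed as one split index instead of a loop assigning two lists.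
import Mathlib
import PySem

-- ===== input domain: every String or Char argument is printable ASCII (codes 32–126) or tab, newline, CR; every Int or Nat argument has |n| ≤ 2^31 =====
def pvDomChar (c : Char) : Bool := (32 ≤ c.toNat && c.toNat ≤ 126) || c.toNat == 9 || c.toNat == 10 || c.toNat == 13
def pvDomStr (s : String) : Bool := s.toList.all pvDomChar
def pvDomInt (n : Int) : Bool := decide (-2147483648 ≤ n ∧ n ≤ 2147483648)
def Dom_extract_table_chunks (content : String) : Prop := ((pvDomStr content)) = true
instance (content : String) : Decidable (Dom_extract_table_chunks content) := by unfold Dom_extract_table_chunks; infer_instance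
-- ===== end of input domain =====

-- B replaces A's in_table state machine by two staged passes: partition the lines into segments
-- at separator lines, then trim each segment to its table block and emit it
-- (objective: alternative decomposition, same asymptotic cost).

-- ===== PORT A =====
-- A's header-finding loop ('for i, line in enumerate(table_lines[:5]): … break')
def bltHeaderLoop (tl : List String) : List (Int × String) → List String × List String
  | [] => ([], [])
  | (i, line) :: rest =>
    if PySem.Str.isIn "|" line then
      if PySem.Str.isIn "---" line || PySem.Str.isIn "===" line || PySem.Str.isIn ":" line then
        (PySem.List.slice tl none (some (i + 1)), PySem.List.slice tl (some (i + 1)) none)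
      else bltHeaderLoop tl rest
    else bltHeaderLoop tl rest

def break_large_table (table_lines : List String) : List String :=
  if table_lines = [] then []
  else
    let hd0 := bltHeaderLoop table_lines
      (PySem.List.enumerate (PySem.List.slice table_lines none (some 5)) 0)
    let hd := if hd0.1 = [] then
        match table_lines with
        | [] => hd0
        | t0 :: ts => ([t0], ts)
      else hd0
    (PySem.List.pyRange 0 (PySem.List.len hd.2) 15).foldl
      (fun chunks i =>
        let chunk_data := PySem.List.slice hd.2 (some i) (some (i + 15))
        if chunk_data ≠ [] then chunks ++ [PySem.Str.join "\n" (hd.1 ++ chunk_data)] else chunks)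
      []

def extract_table_chunks (content : String) : List String :=
  let lines := (PySem.Str.split? content "\n").getD []
  let st := lines.foldl
    (fun (st : List String × List String × Bool) line =>
      if PySem.Str.isIn "|" line && decide (3 ≤ ((PySem.Str.split? line "|").getD []).length) then
        (st.1, st.2.1 ++ [line], true)
      else if st.2.2 then
        if PySem.Str.strip line == "" || PySem.Str.startswith (PySem.Str.strip line) "#" then
          (if st.2.1 ≠ [] then
             (let chunk_text := PySem.Str.join "\n" st.2.1
              if 8000 < PySem.Str.len chunk_text then st.1 ++ break_large_table st.2.1
              else st.1 ++ [chunk_text])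
           else st.1, [], false)
        else (st.1, st.2.1 ++ [line], st.2.2)
      else st)
    ([], [], false)
  if st.2.1 ≠ [] then
    (let chunk_text := PySem.Str.join "\n" st.2.1
     if 8000 < PySem.Str.len chunk_text then st.1 ++ break_large_table st.2.1
     else st.1 ++ [chunk_text])
  else st.1

-- ===== PORT B =====
def isTableLine (line : String) : Bool :=
  PySem.Str.isIn "|" line && decide (3 ≤ ((PySem.Str.split? line "|").getD []).length)

def isBoundaryLine (line : String) : Bool :=
  PySem.Str.strip line == "" || PySem.Str.startswith (PySem.Str.strip line) "#"

def isCutLine (line : String) : Bool := isBoundaryLine line && !isTableLine line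

def bltSplit : List (Int × String) → Int
  | [] => 1
  | (i, line) :: rest =>
    if PySem.Str.isIn "|" line &&
        (PySem.Str.isIn "---" line || PySem.Str.isIn "===" line || PySem.Str.isIn ":" line) then
      i + 1
    else bltSplit rest

def break_large_table_alt (table_lines : List String) : List String :=
  if table_lines = [] then []
  else
    let split := bltSplit (PySem.List.enumerate (PySem.List.slice table_lines none (some 5)) 0)
    let header := PySem.List.slice table_lines none (some split)
    let data := PySem.List.slice table_lines (some split) none
    (PySem.List.pyRange 0 (PySem.List.len data) 15).map
      (fun k => PySem.Str.join "\n" (header ++ PySem.List.slice data (some k) (some (k + 15))))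

-- pass 1 of B: partition the lines into segments at separator lines
def splitCut : List String → List (List String)
  | [] => [[]]
  | l :: rest =>
    if isCutLine l then [] :: splitCut rest
    else
      match splitCut rest with
      | [] => [[l]]
      | s :: ss => (l :: s) :: ss

def extract_table_chunks_alt (content : String) : List String :=
  (splitCut ((PySem.Str.split? content "\n").getD [])).flatMap
    (fun seg =>
      let block := seg.dropWhile (fun l => !isTableLine l)
      if block = [] then []
      else if 8000 < PySem.Str.len (PySem.Str.join "\n" block) then break_large_table_alt block
      else [PySem.Str.join "\n" block])

-- ===== PRECONDITION & SPEC =====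
def Spec_extract_table_chunks (content : String) (out : List String) : Prop := out = extract_table_chunks_alt content
instance (content : String) (out : List String) : Decidable (Spec_extract_table_chunks content out) := by unfold Spec_extract_table_chunks; infer_instance

-- ===== CLAIM (what is proved, stated in full; the proofs are below) =====
def Claim_equal_extract_table_chunks : Prop := ∀ (content : String), Dom_extract_table_chunks content → Spec_extract_table_chunks content (extract_table_chunks content)

-- ===== LEMMAS AND PROOFS =====

-- proof-side names for the pieces of A's loop (definitionally equal to the inline lambdas)
def flushA (chunks cur : List String) : List String :=
  let chunk_text := PySem.Str.join "\n" cur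
  if 8000 < PySem.Str.len chunk_text then chunks ++ break_large_table cur
  else chunks ++ [chunk_text]

def stepA (st : List String × List String × Bool) (line : String) : List String × List String × Bool :=
  if isTableLine line then (st.1, st.2.1 ++ [line], true)
  else if st.2.2 then
    if isBoundaryLine line then
      (if st.2.1 ≠ [] then flushA st.1 st.2.1 else st.1, [], false)
    else (st.1, st.2.1 ++ [line], st.2.2)
  else st

def finA (st : List String × List String × Bool) : List String :=
  if st.2.1 ≠ [] then flushA st.1 st.2.1 else st.1

def emitB (block : List String) : List String :=
  if 8000 < PySem.Str.len (PySem.Str.join "\n" block) then break_large_table_alt block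
  else [PySem.Str.join "\n" block]

def blockOf (seg : List String) : List String := seg.dropWhile (fun l => !isTableLine l)

def segEmit (seg : List String) : List String :=
  if blockOf seg = [] then [] else emitB (blockOf seg)

-- intermediate shape used by the proof: A's single pass as blocks of maximal table runs
def takeBlock : List String → List String × List String
  | [] => ([], [])
  | l :: rest =>
    if isCutLine l then ([], rest)
    else ((l :: (takeBlock rest).1 : List String), (takeBlock rest).2)

theorem takeBlock_snd_length_le (xs : List String) : (takeBlock xs).2.length ≤ xs.length := by
  induction xs with
  | nil => simp [takeBlock]
  | cons l rest ih =>
    simp only [takeBlock]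
    split
    · exact Nat.le_succ _
    · exact Nat.le_succ_of_le ih

def scanBlocks : List String → List (List String)
  | [] => []
  | l :: rest =>
    if isTableLine l then
      (l :: (takeBlock rest).1) :: scanBlocks (takeBlock rest).2
    else scanBlocks rest
termination_by xs => xs.length
decreasing_by
  · exact Nat.lt_succ_of_le (takeBlock_snd_length_le rest)
  · simp

theorem A_as_fold (content : String) :
    extract_table_chunks content
      = finA (((PySem.Str.split? content "\n").getD []).foldl stepA ([], [], false)) := rfl

theorem alt_as_flatMap (content : String) :
    extract_table_chunks_alt content
      = (splitCut ((PySem.Str.split? content "\n").getD [])).flatMap segEmit := rfl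

-- generic: an append-under-always-true-guard loop is a map
theorem foldl_guard_map {α β : Type} (l : List α) (f : α → β) (p : α → Prop) [DecidablePred p]
    (h : ∀ x ∈ l, p x) (acc : List β) :
    l.foldl (fun acc x => if p x then acc ++ [f x] else acc) acc = acc ++ l.map f := by
  induction l generalizing acc with
  | nil => simp
  | cons x t ih =>
    simp only [List.foldl_cons, List.map_cons]
    rw [if_pos (h x (by simp)), ih (fun y hy => h y (by simp [hy]))]
    simp

theorem slice_chunk_ne_nil (data : List String) (k : Int) (h0 : 0 ≤ k)
    (hk : k < (data.length : Int)) :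
    PySem.List.slice data (some k) (some (k + 15)) ≠ [] := by
  rw [PySem.List.slice_toNat data h0 (by omega)]
  have hlt : k.toNat < data.length := by omega
  have hdrop : data.drop k.toNat ≠ [] := by
    simp [List.drop_eq_nil_iff]; omega
  have ht : (k + 15).toNat - k.toNat = 15 := by omega
  rw [ht]
  simpa [List.take_eq_nil_iff] using hdrop

theorem bltHeaderLoop_cases (tl : List String) (e : List (Int × String))
    (hpos : ∀ p ∈ e, 0 ≤ p.1) :
    (bltHeaderLoop tl e
        = (PySem.List.slice tl none (some (bltSplit e)),
           PySem.List.slice tl (some (bltSplit e)) none)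
      ∧ 1 ≤ bltSplit e)
    ∨ (bltHeaderLoop tl e = ([], []) ∧ bltSplit e = 1) := by
  induction e with
  | nil => right; simp [bltHeaderLoop, bltSplit]
  | cons p rest ih =>
    obtain ⟨i, line⟩ := p
    have hi : 0 ≤ i := hpos (i, line) (by simp)
    have hloopEq : bltHeaderLoop tl ((i, line) :: rest)
        = (if PySem.Str.isIn "|" line = true then
            (if (PySem.Str.isIn "---" line || PySem.Str.isIn "===" line
                  || PySem.Str.isIn ":" line) = true then
              (PySem.List.slice tl none (some (i + 1)), PySem.List.slice tl (some (i + 1)) none)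
            else bltHeaderLoop tl rest)
          else bltHeaderLoop tl rest) := rfl
    have hsplitEq : bltSplit ((i, line) :: rest)
        = (if (PySem.Str.isIn "|" line
              && (PySem.Str.isIn "---" line || PySem.Str.isIn "===" line
                  || PySem.Str.isIn ":" line)) = true then i + 1
           else bltSplit rest) := rfl
    by_cases hbar : PySem.Str.isIn "|" line = true
    · by_cases hsep : (PySem.Str.isIn "---" line || PySem.Str.isIn "===" line
          || PySem.Str.isIn ":" line) = true
      · left
        rw [hloopEq, hsplitEq, hbar, hsep]
        exact ⟨rfl, by norm_num; omega⟩
      · rw [Bool.not_eq_true] at hsep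
        rw [hloopEq, hsplitEq, hbar, hsep]
        simpa using ih (fun q hq => hpos q (by simp [hq]))
    · rw [Bool.not_eq_true] at hbar
      rw [hloopEq, hsplitEq, hbar]
      simpa using ih (fun q hq => hpos q (by simp [hq]))

theorem blt_eq (tl : List String) : break_large_table tl = break_large_table_alt tl := by
  rcases tl with _ | ⟨t0, ts⟩
  · rfl
  · set tl := t0 :: ts with htl
    have hne : tl ≠ [] := by simp [htl]
    have hpos : ∀ p ∈ PySem.List.enumerate (PySem.List.slice tl none (some 5)) 0, 0 ≤ p.1 := by
      intro p hp
      rw [PySem.List.mem_enumerate_iff] at hp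
      obtain ⟨k, hk, rfl⟩ := hp
      simp
    set e := PySem.List.enumerate (PySem.List.slice tl none (some 5)) 0 with he
    have hchunks : ∀ header data : List String,
        (PySem.List.pyRange 0 (PySem.List.len data) 15).foldl
          (fun chunks i =>
            let chunk_data := PySem.List.slice data (some i) (some (i + 15))
            if chunk_data ≠ [] then chunks ++ [PySem.Str.join "\n" (header ++ chunk_data)]
            else chunks) []
        = (PySem.List.pyRange 0 (PySem.List.len data) 15).map
            (fun k => PySem.Str.join "\n" (header ++ PySem.List.slice data (some k) (some (k + 15)))) := by
      intro header data
      have hall : ∀ k ∈ PySem.List.pyRange 0 (PySem.List.len data) 15,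
          PySem.List.slice data (some k) (some (k + 15)) ≠ [] := by
        intro k hk
        rw [PySem.List.mem_pyRange_iff_of_pos (by norm_num)] at hk
        exact slice_chunk_ne_nil data k hk.1 (by simpa [PySem.List.len_eq] using hk.2.1)
      simpa using foldl_guard_map (PySem.List.pyRange 0 (PySem.List.len data) 15)
        (fun k => PySem.Str.join "\n" (header ++ PySem.List.slice data (some k) (some (k + 15))))
        (fun k => PySem.List.slice data (some k) (some (k + 15)) ≠ []) hall []
    rcases bltHeaderLoop_cases tl e hpos with ⟨hloop, hge⟩ | ⟨hloop, hone⟩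
    · have hhead : PySem.List.slice tl none (some (bltSplit e)) ≠ [] := by
        rw [PySem.List.slice_to _ (by omega)]
        have : tl.length ≠ 0 := by simp [htl]
        simp [List.take_eq_nil_iff]
        omega
      simp only [break_large_table, break_large_table_alt, ← he, hloop, if_neg hne, hhead]
      exact hchunks _ _
    · simp only [break_large_table, break_large_table_alt, ← he, hloop, hone, if_neg hne]
      have h1 : PySem.List.slice tl none (some (1 : Int)) = [t0] := by
        rw [PySem.List.slice_to _ (by norm_num)]
        simp [htl]
      have h2 : PySem.List.slice tl (some (1 : Int)) none = ts := by
        rw [PySem.List.slice_from _ (by norm_num)]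
        simp [htl]
      simp only [h1, h2]
      exact hchunks [t0] ts

theorem flushA_emitB (chunks blk : List String) :
    flushA chunks blk = chunks ++ emitB blk := by
  simp only [flushA, emitB, blt_eq]
  split <;> simp

theorem lemT (lines : List String) : ∀ chunks cur : List String, cur ≠ [] →
    finA (lines.foldl stepA (chunks, cur, true))
      = finA ((takeBlock lines).2.foldl stepA
          (flushA chunks (cur ++ (takeBlock lines).1), [], false)) := by
  induction lines with
  | nil =>
    intro chunks cur hcur
    simp [takeBlock, finA, hcur]
  | cons l rest ih =>
    intro chunks cur hcur
    by_cases hT : isTableLine l = true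
    · have hs : stepA (chunks, cur, true) l = (chunks, cur ++ [l], true) := by
        simp [stepA, hT]
      have htb : takeBlock (l :: rest)
          = ((l :: (takeBlock rest).1 : List String), (takeBlock rest).2) := by
        simp [takeBlock, isCutLine, hT]
      rw [List.foldl_cons, hs, ih chunks (cur ++ [l]) (by simp), htb]
      simp
    · by_cases hB : isBoundaryLine l = true
      · have hs : stepA (chunks, cur, true) l = (flushA chunks cur, [], false) := by
          simp [stepA, hT, hB, hcur]
        have htb : takeBlock (l :: rest) = (([] : List String), rest) := by
          simp [takeBlock, isCutLine, hT, hB]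
        rw [List.foldl_cons, hs, htb]
        simp
      · have hs : stepA (chunks, cur, true) l = (chunks, cur ++ [l], true) := by
          simp [stepA, hT, hB]
        have htb : takeBlock (l :: rest)
            = ((l :: (takeBlock rest).1 : List String), (takeBlock rest).2) := by
          simp [takeBlock, isCutLine, hT, hB]
        rw [List.foldl_cons, hs, ih chunks (cur ++ [l]) (by simp), htb]
        simp

theorem lemM (lines : List String) : ∀ chunks : List String,
    finA (lines.foldl stepA (chunks, [], false))
      = chunks ++ (scanBlocks lines).flatMap emitB := by
  induction lines using scanBlocks.induct with
  | case1 =>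
    intro chunks
    simp [scanBlocks, finA]
  | case2 l rest hT ih =>
    intro chunks
    have hs : stepA (chunks, [], false) l = (chunks, [l], true) := by
      simp [stepA, hT]
    rw [List.foldl_cons, hs, lemT rest chunks [l] (by simp)]
    rw [ih (flushA chunks ([l] ++ (takeBlock rest).1)), flushA_emitB]
    simp [scanBlocks, hT]
  | case3 l rest hT ih =>
    intro chunks
    have hs : stepA (chunks, [], false) l = (chunks, [], false) := by
      simp [stepA, hT]
    rw [List.foldl_cons, hs, ih chunks]
    simp [scanBlocks, hT]

-- now relate the block scan with B's segment decomposition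
theorem takeBlock_eq (xs : List String) :
    takeBlock xs = (xs.takeWhile (fun l => !isCutLine l),
                    (xs.dropWhile (fun l => !isCutLine l)).drop 1) := by
  induction xs with
  | nil => simp [takeBlock]
  | cons l rest ih =>
    by_cases hc : isCutLine l = true
    · simp [takeBlock, hc]
    · simp only [Bool.not_eq_true] at hc
      simp [takeBlock, hc, ih]

theorem splitCut_ne_nil (xs : List String) : splitCut xs ≠ [] := by
  cases xs with
  | nil => simp [splitCut]
  | cons l rest =>
    simp only [splitCut]
    split
    · simp
    · split <;> simp

theorem splitCut_char (xs : List String) :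
    (xs.dropWhile (fun l => !isCutLine l) = [] → splitCut xs = [xs]) ∧
    (∀ c post, xs.dropWhile (fun l => !isCutLine l) = c :: post →
        splitCut xs = xs.takeWhile (fun l => !isCutLine l) :: splitCut post) := by
  induction xs with
  | nil => constructor <;> simp [splitCut]
  | cons l rest ih =>
    by_cases hc : isCutLine l = true
    · constructor
      · intro h
        simp [hc] at h
      · intro c post h
        simp only [List.dropWhile_cons, hc, Bool.not_true] at h
        obtain ⟨rfl, rfl⟩ : l = c ∧ rest = post := by
          constructor <;> [exact (List.cons.injEq ..).mp h |>.1; exact (List.cons.injEq ..).mp h |>.2]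
        simp [splitCut, hc]
    · simp only [Bool.not_eq_true] at hc
      constructor
      · intro h
        simp only [List.dropWhile_cons, hc, Bool.not_false, ite_true] at h
        have := ih.1 h
        simp [splitCut, hc, this]
      · intro c post h
        simp only [List.dropWhile_cons, hc, Bool.not_false, ite_true] at h
        have := ih.2 c post h
        simp [splitCut, hc, this]

theorem blockOf_table (l : String) (xs : List String) (hT : isTableLine l = true) :
    blockOf (l :: xs) = l :: xs := by
  simp [blockOf, hT]

theorem scanEq (xs : List String) :
    (scanBlocks xs).flatMap emitB = (splitCut xs).flatMap segEmit := by
  induction xs using scanBlocks.induct with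
  | case1 => simp [scanBlocks, splitCut, segEmit, blockOf]
  | case2 l rest hT ih =>
    have hcl : isCutLine l = false := by simp [isCutLine, hT]
    rcases hdw : rest.dropWhile (fun l => !isCutLine l) with _ | ⟨c, post⟩
    · have hsc : splitCut rest = [rest] := (splitCut_char rest).1 hdw
      have htw : rest.takeWhile (fun l => !isCutLine l) = rest := by
        have := List.takeWhile_append_dropWhile (p := fun l => !isCutLine l) (l := rest)
        rw [hdw] at this; simpa using this
      have htb := takeBlock_eq rest
      rw [hdw, htw] at htb
      simp only [scanBlocks, hT, ite_true, htb]
      simp only [splitCut, hcl, Bool.false_eq_true, ite_false, hsc]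
      simp [scanBlocks, segEmit, blockOf_table l rest hT]
    · have hsc := (splitCut_char rest).2 c post hdw
      have htb := takeBlock_eq rest
      rw [hdw] at htb
      simp only [scanBlocks, hT, ite_true, htb]
      simp only [splitCut, hcl, Bool.false_eq_true, ite_false, hsc]
      rw [htb] at ih
      simp only [List.drop_succ_cons, List.drop_zero] at ih ⊢
      simp only [List.flatMap_cons]
      rw [ih]
      congr 1
      rw [segEmit, blockOf_table _ _ hT]
      simp [emitB]
  | case3 l rest hT ih =>
    by_cases hc : isCutLine l = true
    · simp only [scanBlocks, hT, Bool.false_eq_true, ite_false]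
      simp only [splitCut, hc, ite_true, List.flatMap_cons]
      rw [ih]
      simp [segEmit, blockOf]
    · simp only [Bool.not_eq_true] at hc
      simp only [scanBlocks, hT, Bool.false_eq_true, ite_false]
      simp only [splitCut, hc, Bool.false_eq_true, ite_false]
      rcases hsc : splitCut rest with _ | ⟨s, ss⟩
      · exact absurd hsc (splitCut_ne_nil rest)
      · rw [ih, hsc]
        simp only [List.flatMap_cons]
        congr 1
        simp [segEmit, blockOf, hT]

-- ===== VERDICT (by name: the statement is the Claim_ definition above) =====
theorem extract_table_chunks_spec : Claim_equal_extract_table_chunks := by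
  intro content _
  unfold Spec_extract_table_chunks
  rw [A_as_fold, alt_as_flatMap, lemM, scanEq]
  simp
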